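-- pv_equiv track=rewrite | github.com/RIFAT1819/Problem-Solving | Toph/Let’s Build Nepal.py | can_form_nepal
-- ===== SOURCE A (Python) =====
-- def can_form_nepal(S):
--     word = "nepal"
--     for char in word:
--         if char in S:
--             index = S.index(char)
--             S = S[:index] + S[index+1:]
--         else:
--             return False
--     return True
-- ===== SOURCE B (Python) =====
-- def can_form_nepal(S):
--     return all(c in S for c in "nepal")
-- ===== Notes on version B (the rewrite author's own statement) =====
-- stated objective: idiomatic
-- what changed: Replaced the scan-and-slice removal loop by a direct membership check of each letter of 'nepal' (valid since the letters are pairwise distinct, so removals cannot affect other letters).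
import Mathlib
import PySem

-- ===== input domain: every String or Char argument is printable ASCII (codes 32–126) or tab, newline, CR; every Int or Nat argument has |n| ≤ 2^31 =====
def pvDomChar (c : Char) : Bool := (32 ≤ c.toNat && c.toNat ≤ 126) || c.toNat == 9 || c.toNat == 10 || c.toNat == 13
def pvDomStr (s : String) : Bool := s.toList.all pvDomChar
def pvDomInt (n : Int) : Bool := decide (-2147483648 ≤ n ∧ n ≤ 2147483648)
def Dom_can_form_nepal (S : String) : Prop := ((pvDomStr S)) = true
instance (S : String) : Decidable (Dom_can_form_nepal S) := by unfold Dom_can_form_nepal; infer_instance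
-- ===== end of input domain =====

-- B replaces A's scan-and-remove loop by a plain membership check of each letter of
-- "nepal" (valid because those letters are pairwise distinct); objective: idiomatic.

-- ===== PORT A =====
-- loop over the chars of "nepal", removing the first occurrence from S (slice splice)
def canFormNepalLoopA : List Char → List Char → Bool
  | [], _ => true
  | c :: cs, s =>
    if c ∈ s then
      let index := s.findIdx (· = c)
      canFormNepalLoopA cs (s.take index ++ s.drop (index + 1))
    else false

def can_form_nepal (S : String) : Bool :=
  canFormNepalLoopA "nepal".toList S.toList

-- ===== PORT B =====
def can_form_nepal_alt (S : String) : Bool :=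
  "nepal".toList.all (fun c => S.toList.contains c)

-- ===== PRECONDITION & SPEC =====
def Spec_can_form_nepal (S : String) (out : Bool) : Prop := out = can_form_nepal_alt S
instance (S : String) (out : Bool) : Decidable (Spec_can_form_nepal S out) := by unfold Spec_can_form_nepal; infer_instance

-- ===== CLAIM (what is proved, stated in full; the proofs are below) =====
def Claim_equal_can_form_nepal : Prop := ∀ (S : String), Dom_can_form_nepal S → Spec_can_form_nepal S (can_form_nepal S)

-- ===== LEMMAS AND PROOFS =====

-- A's slice splice at the first index of c is exactly List.erase c
theorem all_ext_mem {α : Type} (l : List α) (f g : α → Bool)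
    (h : ∀ x ∈ l, f x = g x) : l.all f = l.all g := by
  induction l with
  | nil => rfl
  | cons a t ih =>
    simp only [List.all_cons, h a (List.mem_cons_self), ih (fun x hx => h x (List.mem_cons_of_mem a hx))]

-- A's slice splice at the first index of c is exactly List.erase c
theorem takeDrop_findIdx_eq_erase (s : List Char) (c : Char) :
    c ∈ s → s.take (s.findIdx (· = c)) ++ s.drop (s.findIdx (· = c) + 1) = s.erase c := by
  induction s with
  | nil => intro h; cases h
  | cons a t ih =>
    intro h
    by_cases hac : a = c
    · subst hac
      simp [List.findIdx_cons]
    · have hct : c ∈ t := by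
        rcases List.mem_cons.mp h with h1 | h1
        · exact absurd h1.symm hac
        · exact h1
      simp only [List.findIdx_cons, decide_eq_false hac, cond_false]
      simp only [List.take_succ_cons, List.drop_succ_cons, List.cons_append,
        List.erase_cons, if_neg (show (a == c) ≠ true by simp [hac])]
      exact congrArg (a :: ·) (ih hct)

-- the main invariant: for a duplicate-free word, the removal loop is a membership check
theorem loopA_eq_all (cs : List Char) :
    ∀ s : List Char, cs.Nodup → canFormNepalLoopA cs s = cs.all (fun c => s.contains c) := by
  induction cs with
  | nil => intro s _; rfl
  | cons c cs ih =>
    intro s hnd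
    rcases List.nodup_cons.mp hnd with ⟨hcn, hnd'⟩
    by_cases hc : c ∈ s
    · rw [canFormNepalLoopA, if_pos hc]
      show canFormNepalLoopA cs (s.take (s.findIdx (· = c)) ++ s.drop (s.findIdx (· = c) + 1)) = _
      rw [takeDrop_findIdx_eq_erase s c hc, ih _ hnd']
      simp only [List.all_cons, List.contains_eq_mem, hc, decide_true, Bool.true_and]
      refine all_ext_mem _ _ _ (fun d hd => ?_)
      have hdc : d ≠ c := fun h => hcn (h ▸ hd)
      simp [List.mem_erase_of_ne hdc]
    · rw [canFormNepalLoopA, if_neg hc]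
      simp [List.all_cons, hc]

-- ===== VERDICT (by name: the statement is the Claim_ definition above) =====
theorem can_form_nepal_spec : Claim_equal_can_form_nepal := by
  intro S _
  show can_form_nepal S = can_form_nepal_alt S
  unfold can_form_nepal can_form_nepal_alt
  exact loopA_eq_all _ _ (by decide)
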